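-- pv_equiv track=rewrite | github.com/skullydazed/old_qmk_configurator | web.py | layout_to_keymap
-- ===== SOURCE A (Python) =====
-- keymap_c_pre = """#include "%s.h"
--
-- #ifdef RGBLIGHT_ENABLE
-- #include "rgblight.h"
-- #endif
--
-- const uint16_t PROGMEM keymaps[][MATRIX_ROWS][MATRIX_COLS] = {
-- """
--
-- keymap_c_post = """};
--
-- const uint16_t PROGMEM fn_actions[] = {
-- };
-- """
--
-- def layout_to_keymap(keyboard_name, layers):
--     keymap_c = [keymap_c_pre % keyboard_name]
--
--     for layer_num, layer in enumerate(layers):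
--         if layer_num != 0:
--             keymap_c[-1] += ','
--
--         rows = []
--         for row in layer:
--             rows.append('\t\t{' + ', '.join(row) + '}')
--         keymap_c.append('\t[%s] = {' % layer_num)
--         keymap_c.append(', \\\n'.join(rows))
--         keymap_c.append('\t}')
--     keymap_c.append(keymap_c_post)
--
--     return '\n'.join(keymap_c)
-- ===== SOURCE B (Python) =====
-- keymap_c_pre = """#include "%s.h"
--
-- #ifdef RGBLIGHT_ENABLE
-- #include "rgblight.h"
-- #endif
--
-- const uint16_t PROGMEM keymaps[][MATRIX_ROWS][MATRIX_COLS] = {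
-- """
--
-- keymap_c_post = """};
--
-- const uint16_t PROGMEM fn_actions[] = {
-- };
-- """
--
--
-- def _commas(blocks):
--     """Append ',' to every block except the last."""
--     if len(blocks) <= 1:
--         return blocks
--     return [blocks[0] + ','] + _commas(blocks[1:])
--
--
-- def layout_to_keymap(keyboard_name, layers):
--     blocks = ['\t[%s] = {\n' % layer_num
--               + ', \\\n'.join('\t\t{' + ', '.join(row) + '}' for row in layer)
--               + '\n\t}'
--               for layer_num, layer in enumerate(layers)]
--     return '\n'.join([keymap_c_pre % keyboard_name] + _commas(blocks) + [keymap_c_post])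
-- ===== Notes on version B (the rewrite author's own statement) =====
-- stated objective: simpler
-- what changed: B builds one self-contained block string per layer and appends ',' to every block but the last before a single join, replacing A's four-element-per-layer list accumulation with in-place ',' mutation of the previous list entry.
import Mathlib
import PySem

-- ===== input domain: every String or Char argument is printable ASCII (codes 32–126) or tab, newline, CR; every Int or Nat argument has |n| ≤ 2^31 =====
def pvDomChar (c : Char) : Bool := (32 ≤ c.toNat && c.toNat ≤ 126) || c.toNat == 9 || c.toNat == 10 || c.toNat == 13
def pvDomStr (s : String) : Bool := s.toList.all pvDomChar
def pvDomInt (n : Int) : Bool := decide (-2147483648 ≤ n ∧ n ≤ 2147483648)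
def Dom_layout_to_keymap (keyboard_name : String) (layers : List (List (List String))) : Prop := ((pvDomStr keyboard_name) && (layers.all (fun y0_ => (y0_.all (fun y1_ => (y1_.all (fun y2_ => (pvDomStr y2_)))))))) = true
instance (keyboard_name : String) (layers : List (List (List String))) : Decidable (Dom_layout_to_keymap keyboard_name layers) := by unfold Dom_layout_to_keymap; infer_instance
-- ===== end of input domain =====

-- B replaces A's in-place ','-mutation of the previous list entry by self-contained
-- per-layer blocks with ',' appended to all but the last (objective: simpler decomposition).

-- ===== PORT A =====
-- keymap_c_pre % keyboard_name (the constant holds one %s)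
def pvKeymapCPre (keyboard_name : String) : String :=
  "#include \"" ++ keyboard_name ++ ".h\"\n\n#ifdef RGBLIGHT_ENABLE\n#include \"rgblight.h\"\n#endif\n\nconst uint16_t PROGMEM keymaps[][MATRIX_ROWS][MATRIX_COLS] = {\n"

def pvKeymapCPost : String :=
  "};\n\nconst uint16_t PROGMEM fn_actions[] = {\n};\n"

def layout_to_keymap (keyboard_name : String) (layers : List (List (List String))) : String :=
  let keymap_c : List String := [pvKeymapCPre keyboard_name]
  let keymap_c := (PySem.List.enumerate layers 0).foldl
    (fun (kc : List String) (p : Int × List (List String)) =>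
      -- if layer_num != 0: keymap_c[-1] += ','
      let kc := if p.1 ≠ 0 then kc.dropLast ++ [(kc.getLast?.getD "") ++ ","] else kc
      let rows := p.2.foldl (fun rs row => rs ++ ["\t\t{" ++ PySem.Str.join ", " row ++ "}"]) []
      kc ++ ["\t[" ++ PySem.Int.toStr p.1 ++ "] = {", PySem.Str.join ", \\\n" rows, "\t}"])
    keymap_c
  let keymap_c := keymap_c ++ [pvKeymapCPost]
  PySem.Str.join "\n" keymap_c

-- ===== PORT B =====
-- _commas: ',' appended to every block except the last
def pvCommas : List String → List String
  | [] => []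
  | [b] => [b]
  | b :: bs => (b ++ ",") :: pvCommas bs

def layout_to_keymap_alt (keyboard_name : String) (layers : List (List (List String))) : String :=
  let blocks := (PySem.List.enumerate layers 0).map
    (fun (p : Int × List (List String)) =>
      "\t[" ++ PySem.Int.toStr p.1 ++ "] = {\n"
        ++ PySem.Str.join ", \\\n" (p.2.map (fun row => "\t\t{" ++ PySem.Str.join ", " row ++ "}"))
        ++ "\n\t}")
  PySem.Str.join "\n" ([pvKeymapCPre keyboard_name] ++ pvCommas blocks ++ [pvKeymapCPost])

-- ===== PRECONDITION & SPEC =====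
def Spec_layout_to_keymap (keyboard_name : String) (layers : List (List (List String))) (out : String) : Prop := out = layout_to_keymap_alt keyboard_name layers
instance (keyboard_name : String) (layers : List (List (List String))) (out : String) : Decidable (Spec_layout_to_keymap keyboard_name layers out) := by unfold Spec_layout_to_keymap; infer_instance

-- ===== CLAIM (what is proved, stated in full; the proofs are below) =====
def Claim_equal_layout_to_keymap : Prop := ∀ (keyboard_name : String) (layers : List (List (List String))), Dom_layout_to_keymap keyboard_name layers → Spec_layout_to_keymap keyboard_name layers (layout_to_keymap keyboard_name layers)

-- ===== LEMMAS AND PROOFS =====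

theorem pv_join_cons (s a : String) (rest : List String) (h : rest ≠ []) :
    PySem.Str.join s (a :: rest) = a ++ s ++ PySem.Str.join s rest := by
  cases rest with
  | nil => exact absurd rfl h
  | cons b bs => simp [PySem.Str.join, PySem.Chars.join_cons_cons, String.append_assoc]

theorem pv_join_singleton (s a : String) : PySem.Str.join s [a] = a := by
  simp [PySem.Str.join, PySem.Chars.join_singleton]

theorem pv_tjc : ("\t}" ++ "," : String) = "\t}," := rfl

-- the row loop of A builds the same list as B's map
theorem pv_rows_foldl (l : List (List String)) (acc : List String) :
    l.foldl (fun rs row => rs ++ ["\t\t{" ++ PySem.Str.join ", " row ++ "}"]) acc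
      = acc ++ l.map (fun row => "\t\t{" ++ PySem.Str.join ", " row ++ "}") := by
  induction l generalizing acc with
  | nil => simp
  | cons x xs ih => rw [List.foldl_cons, ih]; simp

def pvHdr (n : Int) : String := "\t[" ++ PySem.Int.toStr n ++ "] = {"
def pvRj (l : List (List String)) : String :=
  PySem.Str.join ", \\\n" (l.map (fun row => "\t\t{" ++ PySem.Str.join ", " row ++ "}"))
def pvBlk (n : Int) (l : List (List String)) : String := pvHdr n ++ "\n" ++ pvRj l ++ "\n\t}"

-- list that A's fold leaves after the first layer, processing layers indexed from n ≥ 1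
def pvF (n : Int) : List (List (List String)) → List String
  | [] => ["\t}"]
  | l :: ls => "\t}," :: pvHdr n :: pvRj l :: pvF (n + 1) ls

def pvStep (kc : List String) (p : Int × List (List String)) : List String :=
  let kc := if p.1 ≠ 0 then kc.dropLast ++ [(kc.getLast?.getD "") ++ ","] else kc
  let rows := p.2.foldl (fun rs row => rs ++ ["\t\t{" ++ PySem.Str.join ", " row ++ "}"]) []
  kc ++ ["\t[" ++ PySem.Int.toStr p.1 ++ "] = {", PySem.Str.join ", \\\n" rows, "\t}"]

theorem pvStep_zero (kc : List String) (l : List (List String)) :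
    pvStep kc (0, l) = kc ++ [pvHdr 0, pvRj l, "\t}"] := by
  simp only [pvStep]
  rw [pv_rows_foldl]
  simp [pvHdr, pvRj]

theorem pvStep_ne (acc : List String) (x : String) (n : Int) (l : List (List String))
    (hne : n ≠ 0) :
    pvStep (acc ++ [x]) (n, l) = acc ++ [x ++ ",", pvHdr n, pvRj l, "\t}"] := by
  simp only [pvStep]
  rw [pv_rows_foldl]
  simp [hne, pvHdr, pvRj]

theorem pv_foldl_F (ls : List (List (List String))) (n : Int) (acc : List String) (hn : 1 ≤ n) :
    (PySem.List.enumerate ls n).foldl pvStep (acc ++ ["\t}"]) = acc ++ pvF n ls := by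
  induction ls generalizing n acc with
  | nil => simp [PySem.List.enumerate_nil, pvF]
  | cons l ls ih =>
    rw [PySem.List.enumerate_cons, List.foldl_cons, pvStep_ne acc "\t}" n l (by omega)]
    have hsplit : acc ++ ["\t}" ++ ",", pvHdr n, pvRj l, "\t}"]
        = (acc ++ ["\t},", pvHdr n, pvRj l]) ++ ["\t}"] := by
      simp [pv_tjc]
    rw [hsplit, ih (n + 1) _ (by omega)]
    simp [pvF]

-- B's enumerate-map as a structural recursion
def pvG (n : Int) : List (List (List String)) → List String
  | [] => []
  | l :: ls => pvBlk n l :: pvG (n + 1) ls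

theorem pv_map_G (ls : List (List (List String))) (n : Int) :
    (PySem.List.enumerate ls n).map
      (fun (p : Int × List (List String)) =>
        "\t[" ++ PySem.Int.toStr p.1 ++ "] = {\n"
          ++ PySem.Str.join ", \\\n" (p.2.map (fun row => "\t\t{" ++ PySem.Str.join ", " row ++ "}"))
          ++ "\n\t}")
      = pvG n ls := by
  induction ls generalizing n with
  | nil => simp [PySem.List.enumerate_nil, pvG]
  | cons l ls ih =>
    rw [PySem.List.enumerate_cons, List.map_cons, ih]
    simp only [pvG, pvBlk, pvHdr, pvRj, String.append_assoc, List.cons.injEq, and_true]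
    rfl

theorem pvCommas_ne_nil (b : String) (bs : List String) : pvCommas (b :: bs) ≠ [] := by
  cases bs <;> simp [pvCommas]

-- the tails agree once joined
theorem pv_merge1 (X : String) : "\n" ++ ("\t}" ++ X) = "\n\t}" ++ X := by
  rw [← String.append_assoc, show ("\n" : String) ++ "\t}" = "\n\t}" from rfl]

theorem pv_merge2 (X : String) : "\n" ++ ("\t}," ++ X) = "\n\t}" ++ ("," ++ X) := by
  rw [← String.append_assoc, ← String.append_assoc,
      show ("\n" : String) ++ "\t}," = "\n\t}" ++ "," from rfl]

theorem pv_tail_eq (ls : List (List (List String))) (n : Int) (l : List (List String)) :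
    PySem.Str.join "\n" (pvHdr n :: pvRj l :: (pvF (n + 1) ls ++ [pvKeymapCPost]))
      = PySem.Str.join "\n" (pvCommas (pvBlk n l :: pvG (n + 1) ls) ++ [pvKeymapCPost]) := by
  induction ls generalizing n l with
  | nil =>
    simp only [pvF, pvG, pvCommas, List.cons_append, List.nil_append]
    rw [pv_join_cons _ _ _ (by simp), pv_join_cons _ _ _ (by simp),
        pv_join_cons _ _ _ (by simp), pv_join_singleton,
        pv_join_cons _ _ _ (by simp), pv_join_singleton]
    simp only [pvBlk, String.append_assoc, pv_merge1]
  | cons l2 ls ih =>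
    simp only [pvF, pvG, pvCommas, List.cons_append]
    rw [pv_join_cons _ _ _ (by simp), pv_join_cons _ _ _ (by simp),
        pv_join_cons _ _ _ (by simp), ih (n + 1) l2,
        pv_join_cons _ _ _ (by simp [pvCommas_ne_nil])]
    simp only [pvBlk, String.append_assoc, pv_merge2]

-- ===== VERDICT (by name: the statement is the Claim_ definition above) =====
theorem layout_to_keymap_spec : Claim_equal_layout_to_keymap := by
  intro keyboard_name layers _
  unfold Spec_layout_to_keymap
  have hA : layout_to_keymap keyboard_name layers
      = PySem.Str.join "\n"
          ((PySem.List.enumerate layers 0).foldl pvStep [pvKeymapCPre keyboard_name]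
            ++ [pvKeymapCPost]) := rfl
  have hB : layout_to_keymap_alt keyboard_name layers
      = PySem.Str.join "\n"
          ([pvKeymapCPre keyboard_name] ++ pvCommas (pvG 0 layers) ++ [pvKeymapCPost]) := by
    show PySem.Str.join "\n" ([pvKeymapCPre keyboard_name]
        ++ pvCommas ((PySem.List.enumerate layers 0).map _) ++ [pvKeymapCPost]) = _
    rw [pv_map_G]
  rw [hA, hB]
  cases layers with
  | nil =>
    rw [PySem.List.enumerate_nil]
    simp [pvG, pvCommas]
  | cons l ls =>
    rw [PySem.List.enumerate_cons, List.foldl_cons, pvStep_zero]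
    have hconc : ([pvKeymapCPre keyboard_name] ++ [pvHdr 0, pvRj l, "\t}"])
        = ([pvKeymapCPre keyboard_name, pvHdr 0, pvRj l]) ++ ["\t}"] := by simp
    rw [hconc, pv_foldl_F ls (0 + 1) _ (by norm_num)]
    have htail := pv_tail_eq ls 0 l
    norm_num at htail ⊢
    simp only [pvG]
    rw [pv_join_cons _ _ _ (by simp), htail,
        pv_join_cons _ _ _ (by simp [pvCommas_ne_nil])]
    norm_num
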